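-- pv_equiv track=rewrite | github.com/RedVeil/foundations2019 | doormat_challenge.py | doormat
-- ===== SOURCE A (Python) =====
-- def doormat(num):
--     m = num*3
--     x = (m//2)-1
--     y = 1
--     z = (m//2)-3
--     #half=("-"*x + ".|."*y + "-"*x)
--     first_half = ""
--     welcome = ("-"*z + "WELCOME" + "-"*z+"\n")
--     second_half = ""
--
--     def half(x,y):
--         return ("-"*x + ".|."*y + "-"*x+"\n")
--
-- #first half
--     for i in range((num//2)):
--         first_half+=half(x,y)
--         y+=2
--         x-=3
--
--     y-=2
--     x+=3
-- #second hlaf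
--     for i in range((num//2)):
--         second_half += half(x,y)
--         y-=2
--         x+=3
--
--
--
--     all=first_half+welcome+second_half
--     return all
-- ===== SOURCE B (Python) =====
-- def doormat(num):
--     n = max(num // 2, 0)
--     h = (num * 3) // 2
--     w = 2 * h + 1
--     # the '.|.' phase (c - left) % 3 = (c - h + 1) % 3 is the same in every row, so
--     # precompute one full-width periodic pattern string and slice it per row
--     P = ''.join('.|.'[(c - h + 1) % 3] for c in range(w))
--     def row(t):
--         pad = h - 1 - 3 * t
--         return '-' * pad + P[pad:w - pad] + '-' * pad
--     mid = '-' * (h - 3) + 'WELCOME' + '-' * (h - 3)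
--     lines = [mid if r == n else row(min(r, 2 * n - r)) for r in range(2 * n + 1)]
--     return '\n'.join(lines) + '\n'
-- ===== Notes on version B (the rewrite author's own statement) =====
-- stated objective: alternative
-- what changed: Instead of accumulating rows of '-'*x + '.|.'*y in two counter-driven loops with post-loop counter rewinding, B observes that the '.|.' phase (c-left)%3 = (c-h+1)%3 is the same in every row, precomputes one full-width periodic pattern string column-by-column, and emits each row as a dash-padded slice of it in a single pass over row indices with the symmetric fold t = min(r, 2n-r).
import Mathlib
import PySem

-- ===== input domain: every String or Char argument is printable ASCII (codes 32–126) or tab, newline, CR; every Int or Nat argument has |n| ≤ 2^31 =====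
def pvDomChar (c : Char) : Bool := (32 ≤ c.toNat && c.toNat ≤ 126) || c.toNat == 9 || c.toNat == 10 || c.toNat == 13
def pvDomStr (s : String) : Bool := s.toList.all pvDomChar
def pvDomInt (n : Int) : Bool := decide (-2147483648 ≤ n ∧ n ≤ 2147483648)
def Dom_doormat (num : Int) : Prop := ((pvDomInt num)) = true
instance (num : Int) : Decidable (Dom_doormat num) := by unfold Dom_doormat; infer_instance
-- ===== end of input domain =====

-- B replaces A's two counter-driven accumulator loops by precomputing one full-width periodic
-- pattern string (the '.|.' phase is the same in every row) and producing each row as a padded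
-- slice of it, indexed by the symmetric fold t = min(r, 2n-r) (alternative algorithm).

-- ===== PORT A =====
-- the nested helper `half(x, y)`
def pvHalf (x y : Int) : List Char :=
  PySem.List.pyRepeat ['-'] x ++ PySem.List.pyRepeat ".|.".toList y ++
    PySem.List.pyRepeat ['-'] x ++ ['\n']

-- body of A's first loop: append half(x, y), then y += 2, x -= 3 (state = (acc, x, y))
def pvStep1 (st : List Char × Int × Int) (_i : Int) : List Char × Int × Int :=
  (st.1 ++ pvHalf st.2.1 st.2.2, st.2.1 - 3, st.2.2 + 2)

-- body of A's second loop: append half(x, y), then y -= 2, x += 3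
def pvStep2 (st : List Char × Int × Int) (_i : Int) : List Char × Int × Int :=
  (st.1 ++ pvHalf st.2.1 st.2.2, st.2.1 + 3, st.2.2 - 2)

def doormat (num : Int) : String :=
  let m := num * 3
  let x := PySem.Int.floordiv m 2 - 1
  let y : Int := 1
  let z := PySem.Int.floordiv m 2 - 3
  let welcome := PySem.List.pyRepeat ['-'] z ++ "WELCOME".toList ++
    PySem.List.pyRepeat ['-'] z ++ ['\n']
  let r1 := (PySem.List.pyRange 0 (PySem.Int.floordiv num 2) 1).foldl pvStep1 (([] : List Char), x, y)
  -- after the first loop: y -= 2; x += 3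
  let x2 := r1.2.1 + 3
  let y2 := r1.2.2 - 2
  let r2 := (PySem.List.pyRange 0 (PySem.Int.floordiv num 2) 1).foldl pvStep2 (([] : List Char), x2, y2)
  String.mk (r1.1 ++ welcome ++ r2.1)

-- ===== PORT B =====
def pvPat : List Char := ".|.".toList

-- P: the full-width periodic pattern string, one char per column
-- (the index (c - h + 1) % 3 is always in 0..2, so Python's s[i] never raises; getD is unreachable)
def pvP (h : Int) : List Char :=
  (PySem.List.pyRange 0 (2 * h + 1) 1).map
    (fun c => (PySem.List.pyGet? pvPat (PySem.Int.mod (c - h + 1) 3)).getD '-')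

-- row(t): dashes around a slice of P
def pvRowB (h : Int) (P : List Char) (t : Int) : List Char :=
  PySem.List.pyRepeat ['-'] (h - 1 - 3 * t) ++
    PySem.List.slice P (some (h - 1 - 3 * t)) (some ((2 * h + 1) - (h - 1 - 3 * t))) ++
    PySem.List.pyRepeat ['-'] (h - 1 - 3 * t)

def doormat_alt (num : Int) : String :=
  let n := max (PySem.Int.floordiv num 2) 0
  let h := PySem.Int.floordiv (num * 3) 2
  let P := pvP h
  let mid := PySem.List.pyRepeat ['-'] (h - 3) ++ "WELCOME".toList ++ PySem.List.pyRepeat ['-'] (h - 3)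
  let lines := (PySem.List.pyRange 0 (2 * n + 1) 1).map (fun r =>
    if r = n then mid else pvRowB h P (min r (2 * n - r)))
  String.mk (PySem.Chars.join ['\n'] lines ++ ['\n'])

-- ===== PRECONDITION & SPEC =====
def Spec_doormat (num : Int) (out : String) : Prop := out = doormat_alt num
instance (num : Int) (out : String) : Decidable (Spec_doormat num out) := by unfold Spec_doormat; infer_instance

-- ===== CLAIM (what is proved, stated in full; the proofs are below) =====
def Claim_equal_doormat : Prop := ∀ (num : Int), Dom_doormat num → Spec_doormat num (doormat num)

-- ===== LEMMAS AND PROOFS =====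

-- A's first loop, characterised (the loop index is unused; only the range's length matters)
theorem pvStep1_fold (l : List Int) (s : List Char) (x y : Int) :
    l.foldl pvStep1 (s, x, y) =
      (s ++ ((List.range l.length).map (fun k : Nat => pvHalf (x - 3*(k:Int)) (y + 2*(k:Int)))).flatten,
       x - 3*l.length, y + 2*l.length) := by
  induction l generalizing s x y with
  | nil => simp
  | cons a l ih =>
    simp only [List.foldl_cons, List.length_cons]
    rw [show pvStep1 (s,x,y) a = (s ++ pvHalf x y, x-3, y+2) from rfl, ih]
    have h0 : pvHalf (x - 3*((0:Nat):Int)) (y + 2*((0:Nat):Int)) = pvHalf x y := by norm_num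
    have hm : (List.range l.length).map (fun k : Nat => pvHalf (x - 3 - 3*(k:Int)) (y + 2 + 2*(k:Int))) =
        (List.range l.length).map ((fun k : Nat => pvHalf (x - 3*(k:Int)) (y + 2*(k:Int))) ∘ Nat.succ) := by
      apply List.map_congr_left
      intro k _
      simp only [Function.comp_apply]
      congr 1 <;> push_cast <;> ring
    rw [List.range_succ_eq_map, List.map_cons, List.map_map, List.flatten_cons, h0, hm,
      List.append_assoc]
    refine Prod.ext rfl (Prod.ext ?_ ?_) <;> (push_cast; ring)

-- A's second loop, characterised
theorem pvStep2_fold (l : List Int) (s : List Char) (x y : Int) :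
    l.foldl pvStep2 (s, x, y) =
      (s ++ ((List.range l.length).map (fun k : Nat => pvHalf (x + 3*(k:Int)) (y - 2*(k:Int)))).flatten,
       x + 3*l.length, y - 2*l.length) := by
  induction l generalizing s x y with
  | nil => simp
  | cons a l ih =>
    simp only [List.foldl_cons, List.length_cons]
    rw [show pvStep2 (s,x,y) a = (s ++ pvHalf x y, x+3, y-2) from rfl, ih]
    have h0 : pvHalf (x + 3*((0:Nat):Int)) (y - 2*((0:Nat):Int)) = pvHalf x y := by norm_num
    have hm : (List.range l.length).map (fun k : Nat => pvHalf (x + 3 + 3*(k:Int)) (y - 2 - 2*(k:Int))) =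
        (List.range l.length).map ((fun k : Nat => pvHalf (x + 3*(k:Int)) (y - 2*(k:Int))) ∘ Nat.succ) := by
      apply List.map_congr_left
      intro k _
      simp only [Function.comp_apply]
      congr 1 <;> push_cast <;> ring
    rw [List.range_succ_eq_map, List.map_cons, List.map_map, List.flatten_cons, h0, hm,
      List.append_assoc]
    refine Prod.ext rfl (Prod.ext ?_ ?_) <;> (push_cast; ring)

-- reversing a map over range re-indexes it back to front
theorem pvRangeRev (f : Nat → List Char) (n : Nat) :
    (List.map f (List.range n)).reverse = List.map (fun k => f (n-1-k)) (List.range n) := by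
  induction n with
  | zero => simp
  | succ n ih =>
    have hR : List.map (fun k => f (n+1-1-k)) (List.range (n+1)) =
        f n :: List.map (fun k => f (n-1-k)) (List.range n) := by
      rw [List.range_succ_eq_map, List.map_cons, List.map_map]
      congr 1
      apply List.map_congr_left
      intro k _
      simp only [Function.comp_apply]
      congr 1
      omega
    rw [hR, List.range_succ, List.map_append, List.reverse_append, ih]
    simp

-- newline-terminated rows concatenated = rows joined by '\n' plus a final '\n'
theorem pvJoinRows (a : List Char) (l : List (List Char)) :
    (List.map (· ++ ['\n']) (a :: l)).flatten = PySem.Chars.join ['\n'] (a :: l) ++ ['\n'] := by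
  induction l generalizing a with
  | nil => simp [PySem.Chars.join_singleton]
  | cons b l ih =>
    rw [List.map_cons, List.flatten_cons, ih, PySem.Chars.join_cons_cons]
    simp [List.append_assoc]

-- the '.|.' band taken column by column modulo 3 is '.|.' repeated
theorem pvPatCycle (k : Nat) :
    (List.range (3*k)).map (fun j : Nat => (PySem.List.pyGet? pvPat (((j : Int)) % 3)).getD '-') =
      (List.replicate k pvPat).flatten := by
  induction k with
  | zero => simp
  | succ k ih =>
    have h3 : 3*(k+1) = 3*k + 3 := by ring
    rw [h3, List.range_add, List.map_append, ih, List.map_map]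
    have h2 : (List.range 3).map ((fun j : Nat => (PySem.List.pyGet? pvPat (((j : Int)) % 3)).getD '-') ∘ (3*k + ·)) = pvPat := by
      have he : ∀ j ∈ List.range 3,
          ((fun j : Nat => (PySem.List.pyGet? pvPat (((j : Int)) % 3)).getD '-') ∘ (3*k + ·)) j =
            (PySem.List.pyGet? pvPat ((j : Int))).getD '-' := by
        intro j hj
        have hj3 : j < 3 := List.mem_range.mp hj
        simp only [Function.comp_apply]
        congr 2
        push_cast
        omega
      rw [List.map_congr_left he]
      decide
    rw [h2, List.replicate_add, List.flatten_append]
    simp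

-- the slice of the periodic pattern string is exactly '.|.' repeated 2t+1 times
theorem pvBand (h t : Int) (ht : 0 ≤ t) (hx : 0 ≤ h - 1 - 3*t) :
    PySem.List.slice (pvP h) (some (h - 1 - 3*t)) (some ((2*h + 1) - (h - 1 - 3*t))) =
      PySem.List.pyRepeat pvPat (2*t+1) := by
  set x : Nat := (h - 1 - 3*t).toNat with hxdef
  set p : Nat := (2*t+1).toNat with hpdef
  have hwn : (2*h + 1 - 0).toNat = x + (3*p + x) := by omega
  have hb1 : h - 1 - 3*t = ((x:Nat) : Int) := by omega
  have hb2 : (2*h + 1) - (h - 1 - 3*t) = (((x + 3*p : Nat)) : Int) := by omega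
  rw [hb2, hb1, PySem.List.slice_natCast]
  unfold pvP
  rw [PySem.List.pyRange_one, List.map_map, hwn, ← List.map_drop, List.range_eq_range',
    List.drop_range']
  have htk : x + 3*p - x = 3*p := by omega
  have hr : List.range' (0 + x*1) (x + (3*p + x) - x) = List.range' x (3*p) ++ List.range' (x + 3*p) x := by
    rw [show 0 + x*1 = x by omega, show x + (3*p + x) - x = 3*p + x by omega,
      ← List.range'_append_1]
  rw [htk, hr, List.map_append, List.take_append_of_le_length (by simp)]
  rw [List.take_of_length_le (by simp)]
  have hseg : ∀ j ∈ List.range' x (3*p),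
      ((fun c => (PySem.List.pyGet? pvPat (PySem.Int.mod (c - h + 1) 3)).getD '-') ∘
        fun k : Nat => 0 + (k:Int)) j =
      (fun j : Nat => (PySem.List.pyGet? pvPat (((j - x : Nat) : Int) % 3)).getD '-') j := by
    intro j hj
    obtain ⟨i, hi, hji⟩ := List.mem_range'.mp hj
    simp only [Function.comp_apply, zero_add]
    congr 1
    rw [PySem.Int.mod_eq_emod_of_pos (by norm_num)]
    congr 1
    omega
  rw [List.map_congr_left hseg, List.range'_eq_map_range, List.map_map]
  have hshift : ∀ j ∈ List.range (3*p),
      ((fun j : Nat => (PySem.List.pyGet? pvPat (((j - x : Nat) : Int) % 3)).getD '-') ∘ (x + ·)) j =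
      (fun j : Nat => (PySem.List.pyGet? pvPat ((j : Int) % 3)).getD '-') j := by
    intro j hj
    simp only [Function.comp_apply]
    congr 2
    omega
  rw [List.map_congr_left hshift, pvPatCycle]
  show (List.replicate p pvPat).flatten = _
  unfold PySem.List.pyRepeat
  rw [← hpdef]

-- length of '.|.' is 3 (used to relate A's pyRepeat to B's pvPat)
theorem pvPat_eq : ".|.".toList = pvPat := rfl

-- ===== VERDICT (by name: the statement is the Claim_ definition above) =====
theorem doormat_spec : Claim_equal_doormat := by
  intro num _
  show doormat num = doormat_alt num
  set h : Int := PySem.Int.floordiv (num*3) 2 with hh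
  set n2 : Int := PySem.Int.floordiv num 2 with hn2
  set n : Nat := (n2 - 0).toNat with hn
  have hhe : h = (num*3) / 2 := PySem.Int.floordiv_eq_ediv_of_pos (by norm_num)
  have hn2e : n2 = num / 2 := PySem.Int.floordiv_eq_ediv_of_pos (by norm_num)
  have hkey : ∀ k : Nat, k < n → 0 ≤ h - 1 - 3*(k:Int) := by
    intro k hk
    omega
  have hmax : max n2 0 = (n:Int) := by omega
  set lineF : Nat → List Char := fun k =>
    PySem.List.pyRepeat ['-'] (h-1-3*(k:Int)) ++ PySem.List.pyRepeat pvPat (2*(k:Int)+1) ++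
      PySem.List.pyRepeat ['-'] (h-1-3*(k:Int)) with hlineF
  set topL : List (List Char) := (List.range n).map lineF with htopL
  set wline : List Char := PySem.List.pyRepeat ['-'] (h-3) ++ "WELCOME".toList ++
    PySem.List.pyRepeat ['-'] (h-3) with hwline
  -- B equals join of topL ++ [wline] ++ topL.reverse
  have hB : doormat_alt num = String.mk (PySem.Chars.join ['\n'] (topL ++ [wline] ++ topL.reverse) ++ ['\n']) := by
    simp only [doormat_alt, ← hh, ← hn2, hmax]
    rw [PySem.List.pyRange_one, List.map_map]
    refine congrArg String.mk (congrArg (fun L => PySem.Chars.join ['\n'] L ++ ['\n']) ?_)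
    have hlen : (2*(n:Int) + 1 - 0).toNat = n + (1 + n) := by omega
    rw [hlen, List.range_add, List.map_append, List.range_add, List.map_append]
    conv_rhs => rw [List.append_assoc]
    congr 1
    · -- top rows: r = k < n
      rw [htopL]
      apply List.map_congr_left
      intro k hk
      have hkn : k < n := List.mem_range.mp hk
      simp only [Function.comp_apply, zero_add]
      rw [if_neg (by omega)]
      have hmin : min (k:Int) (2*(n:Int) - k) = (k:Int) := by omega
      rw [hmin]
      show pvRowB h (pvP h) (k:Int) = lineF k
      unfold pvRowB
      rw [pvBand h k (by omega) (hkey k hkn), hlineF]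
    · rw [List.map_append]
      congr 1
      · -- middle row
        simp only [List.range_one, List.map_cons, List.map_nil, Function.comp_apply,
          zero_add, Nat.add_zero]
        rw [if_pos trivial, hwline]
      · -- bottom rows: r = n + (1 + j), j < n
        rw [List.map_map, List.map_map, htopL, pvRangeRev lineF n]
        apply List.map_congr_left
        intro j hj
        have hjn : j < n := List.mem_range.mp hj
        simp only [Function.comp_apply, zero_add]
        rw [if_neg (by push_cast; omega)]
        have hmin : min (((n + (1 + j) : Nat)):Int) (2*(n:Int) - (((n + (1 + j) : Nat)):Int)) =
            ((n - 1 - j : Nat):Int) := by push_cast; omega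
        rw [hmin]
        show pvRowB h (pvP h) (((n - 1 - j : Nat)):Int) = lineF (n - 1 - j)
        unfold pvRowB
        rw [pvBand h _ (by omega) (hkey _ (by omega)), hlineF]
  -- A equals concatenation of newline-terminated rows
  have hA : doormat num =
      String.mk ((List.map (· ++ ['\n']) (topL ++ [wline] ++ topL.reverse)).flatten) := by
    simp only [doormat, ← hh, ← hn2]
    rw [PySem.List.pyRange_one, pvStep1_fold]
    simp only [List.length_map, List.length_range, List.nil_append]
    rw [pvStep2_fold]
    simp only [List.length_map, List.length_range, List.nil_append, ← hn]
    refine congrArg String.mk ?_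
    have hFH : ∀ k ∈ List.range n,
        pvHalf (h - 1 - 3*(k:Int)) (1 + 2*(k:Int)) = ((· ++ ['\n']) ∘ lineF) k := by
      intro k _
      simp only [Function.comp_apply, hlineF, pvHalf, pvPat_eq]
      have e : (1 + 2*(k:Int)) = 2*(k:Int)+1 := by ring
      rw [e]
    have hSH : ∀ k ∈ List.range n,
        pvHalf (h - 1 - 3*(n:Int) + 3 + 3*(k:Int)) (1 + 2*(n:Int) - 2 - 2*(k:Int)) =
          (fun j => ((· ++ ['\n']) ∘ lineF) (n-1-j)) k := by
      intro k hk
      have hkn : k < n := List.mem_range.mp hk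
      simp only [Function.comp_apply, hlineF, pvHalf, pvPat_eq]
      have e1 : h - 1 - 3*(n:Int) + 3 + 3*(k:Int) = h - 1 - 3*((n-1-k : Nat):Int) := by
        omega
      have e2 : 1 + 2*(n:Int) - 2 - 2*(k:Int) = 2*((n-1-k : Nat):Int)+1 := by
        omega
      rw [e1, e2]
    rw [List.map_congr_left hFH, List.map_congr_left hSH, ← pvRangeRev ((· ++ ['\n']) ∘ lineF) n]
    rw [← List.map_map, ← htopL]
    rw [← List.map_reverse]
    simp only [List.map_append, List.flatten_append]
    simp only [List.map_cons, List.map_nil, List.flatten_cons, List.flatten_nil,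
      List.append_nil, List.append_assoc]
    rw [hwline]
    simp [List.append_assoc]
  rw [hA, hB]
  refine congrArg String.mk ?_
  obtain ⟨a, l, he⟩ : ∃ a l, topL ++ [wline] ++ topL.reverse = a :: l := by
    cases topL with
    | nil => exact ⟨wline, [], rfl⟩
    | cons a t => exact ⟨a, t ++ [wline] ++ (a :: t).reverse, by simp⟩
  rw [he, pvJoinRows]
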